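-- pv_equiv track=rewrite | github.com/DamienGallet/stockForecast | interpolationEngine.py | modifyStandardRange
-- ===== SOURCE A (Python) =====
-- def standardRange():
--     tab = list(range(-200,201,40))
--     return tab
--
-- def modifyStandardRange(xn):
--
--     j = 0
--     xs = standardRange()
--     for i in range(len(xs)):
--         if abs(xs[i]-xn) < 20:
--             xs[i] = xn
--             j= i
--
--     return xs,j
-- ===== SOURCE B (Python) =====
-- def modifyStandardRange(xn):
--     # grid is -200..200 step 40: compute the unique candidate index arithmetically
--     xs = list(range(-200, 201, 40))
--     k, r = divmod(xn + 220, 40)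
--     if r != 0 and 0 <= k <= 10:
--         xs[k] = xn
--         return xs, k
--     return xs, 0
-- ===== Notes on version B (the rewrite author's own statement) =====
-- stated objective: simpler
-- what changed: Replaces A's scan over every grid point by a single divmod((xn+220), 40) that computes the unique candidate index arithmetically and tests only it.
import Mathlib
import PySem

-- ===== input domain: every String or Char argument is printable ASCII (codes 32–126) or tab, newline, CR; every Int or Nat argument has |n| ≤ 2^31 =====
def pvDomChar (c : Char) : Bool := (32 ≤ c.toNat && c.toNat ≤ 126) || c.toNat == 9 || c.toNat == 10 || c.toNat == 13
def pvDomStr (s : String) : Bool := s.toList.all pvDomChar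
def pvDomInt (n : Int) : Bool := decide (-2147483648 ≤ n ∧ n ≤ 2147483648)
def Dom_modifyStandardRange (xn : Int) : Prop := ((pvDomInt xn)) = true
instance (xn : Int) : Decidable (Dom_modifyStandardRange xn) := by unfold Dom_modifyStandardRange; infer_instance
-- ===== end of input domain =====

-- B replaces A's per-element scan by a direct divmod computation of the unique
-- candidate grid index (objective: simpler; same result proved for all xn).

-- ===== PORT A =====
def standardRange : List Int := PySem.List.pyRange (-200) 201 40

def modifyStandardRange (xn : Int) : List Int × Int :=
  let xs := standardRange
  (PySem.List.pyRange 0 xs.length 1).foldl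
    (fun (st : List Int × Int) i =>
      if |PySem.List.pyGetD st.1 i 0 - xn| < 20 then (st.1.set i.toNat xn, i) else st)
    (xs, 0)

-- ===== PORT B =====
def modifyStandardRange_alt (xn : Int) : List Int × Int :=
  let xs := PySem.List.pyRange (-200) 201 40
  let k := PySem.Int.floordiv (xn + 220) 40
  let r := PySem.Int.mod (xn + 220) 40
  if r ≠ 0 ∧ 0 ≤ k ∧ k ≤ 10 then (xs.set k.toNat xn, k) else (xs, 0)

-- ===== PRECONDITION & SPEC =====
def Spec_modifyStandardRange (xn : Int) (out : List Int × Int) : Prop := out = modifyStandardRange_alt xn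
instance (xn : Int) (out : List Int × Int) : Decidable (Spec_modifyStandardRange xn out) := by unfold Spec_modifyStandardRange; infer_instance

-- ===== CLAIM (what is proved, stated in full; the proofs are below) =====
def Claim_equal_modifyStandardRange : Prop := ∀ (xn : Int), Dom_modifyStandardRange xn → Spec_modifyStandardRange xn (modifyStandardRange xn)

-- ===== LEMMAS AND PROOFS =====

lemma pv_len : ((PySem.List.pyRange (-200) 201 40).length : Int) = 11 := by decide

-- value of the untouched grid at index 0 ≤ i ≤ 10
lemma pv_getD (i : Int) (h0 : 0 ≤ i) (h1 : i ≤ 10) :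
    PySem.List.pyGetD (PySem.List.pyRange (-200) 201 40) i 0 = -200 + 40 * i := by
  interval_cases i <;> decide

-- value of the grid with position n replaced, at an index i ≠ n
lemma pv_getD_set (xn : Int) (n : Nat) (i : Int) (h0 : 0 ≤ i) (h1 : i ≤ 10)
    (hne : i ≠ (n : Int)) :
    PySem.List.pyGetD ((PySem.List.pyRange (-200) 201 40).set n xn) i 0 = -200 + 40 * i := by
  have hlen : ((PySem.List.pyRange (-200) 201 40).set n xn).length = 11 := by
    simp [List.length_set]; decide
  rw [PySem.List.pyGetD_of_nonneg _ _ h0]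
  have : ((PySem.List.pyRange (-200) 201 40).set n xn).getD i.toNat 0
       = (PySem.List.pyRange (-200) 201 40).getD i.toNat 0 := by
    rw [List.getD, List.getD, List.getElem?_set_ne (by omega)]
  rw [this, ← PySem.List.pyGetD_of_nonneg _ _ h0, pv_getD i h0 h1]

-- A's loop leaves the state unchanged when no index in the list hits
lemma pv_no_hit (xn : Int) (l : List Int) (st : List Int × Int)
    (h : ∀ i ∈ l, ¬ |PySem.List.pyGetD st.1 i 0 - xn| < 20) :
    l.foldl
      (fun (st : List Int × Int) i =>
        if |PySem.List.pyGetD st.1 i 0 - xn| < 20 then (st.1.set i.toNat xn, i) else st)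
      st = st := by
  induction l with
  | nil => rfl
  | cons a t ih =>
      rw [List.foldl_cons, if_neg (h a (by simp))]
      exact ih (fun i hi => h i (by simp [hi]))

lemma pv_main (xn : Int) : modifyStandardRange xn = modifyStandardRange_alt xn := by
  unfold modifyStandardRange modifyStandardRange_alt standardRange
  simp only [pv_len]
  have hdm := PySem.Int.floordiv_mul_add_mod (xn + 220) 40
  have hr0 : 0 ≤ PySem.Int.mod (xn + 220) 40 := PySem.Int.mod_nonneg _ (by norm_num)
  have hr1 : PySem.Int.mod (xn + 220) 40 < 40 := PySem.Int.mod_lt _ (by norm_num)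
  set k := PySem.Int.floordiv (xn + 220) 40 with hkdef
  set r := PySem.Int.mod (xn + 220) 40 with hrdef
  clear_value k r
  by_cases hB : r ≠ 0 ∧ 0 ≤ k ∧ k ≤ 10
  · -- hit: the unique matching index is k
    obtain ⟨hr, hk0, hk10⟩ := hB
    rw [if_pos ⟨hr, hk0, hk10⟩]
    rw [PySem.List.pyRange_one_append 0 k 11 hk0 (by omega),
        PySem.List.pyRange_one_cons (by omega : k < 11), List.foldl_append]
    have h1 : (PySem.List.pyRange 0 k).foldl
        (fun (st : List Int × Int) i =>
          if |PySem.List.pyGetD st.1 i 0 - xn| < 20 then (st.1.set i.toNat xn, i) else st)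
        (PySem.List.pyRange (-200) 201 40, 0)
        = (PySem.List.pyRange (-200) 201 40, 0) := by
      apply pv_no_hit
      intro i hi
      rw [PySem.List.mem_pyRange_one] at hi
      rw [pv_getD i hi.1 (by omega), abs_sub_lt_iff]
      omega
    rw [h1, List.foldl_cons,
        if_pos (by rw [pv_getD k hk0 hk10, abs_sub_lt_iff]; omega)]
    apply pv_no_hit
    intro i hi
    rw [PySem.List.mem_pyRange_one] at hi
    rw [pv_getD_set xn k.toNat i (by omega) (by omega) (by omega), abs_sub_lt_iff]
    omega
  · -- miss: no index hits, both sides return the fresh grid and 0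
    rw [if_neg hB]
    apply pv_no_hit
    intro i hi
    rw [PySem.List.mem_pyRange_one] at hi
    rw [pv_getD i hi.1 (by omega), abs_sub_lt_iff]
    omega

-- ===== VERDICT (by name: the statement is the Claim_ definition above) =====
theorem modifyStandardRange_spec : Claim_equal_modifyStandardRange := by
  intro xn _
  exact pv_main xn
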